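-- pv_equiv track=rewrite | github.com/nkukarl/leetcode | island_perimeter.py | get_overlapped
-- ===== SOURCE A (Python) =====
-- def get_overlapped(row):
--     """
--
--     E.g., row = [1, 1, 1, 0, 0, 1, 1], should return 6.
--     Since in the first chunk of 1s, there are 4 overlapped edges.
--     And in the second chunk of 1s, there are 2 overlapped edges.
--
--     Returns:
--
--     """
--     row = [0] + list(row) + [0]
--     overlapped = 0
--     count = 0
--     for n in row:
--         if 1 == n:
--             count += 1
--         else:
--             overlapped += max(0, (count - 1) * 2)
--             count = 0
--     return overlapped
-- ===== SOURCE B (Python) =====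
-- def get_overlapped(row):
--     r = list(row)
--     return 2 * sum(1 for a, b in zip(r, r[1:]) if a == 1 and b == 1)
-- ===== Notes on version B (the rewrite author's own statement) =====
-- stated objective: simpler
-- what changed: B drops the run-length counter and the zero-padding entirely: it counts adjacent pairs of ones with zip(r, r[1:]) and doubles the count, since a run of L ones contributes exactly twice its number of internal adjacencies.
import Mathlib
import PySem

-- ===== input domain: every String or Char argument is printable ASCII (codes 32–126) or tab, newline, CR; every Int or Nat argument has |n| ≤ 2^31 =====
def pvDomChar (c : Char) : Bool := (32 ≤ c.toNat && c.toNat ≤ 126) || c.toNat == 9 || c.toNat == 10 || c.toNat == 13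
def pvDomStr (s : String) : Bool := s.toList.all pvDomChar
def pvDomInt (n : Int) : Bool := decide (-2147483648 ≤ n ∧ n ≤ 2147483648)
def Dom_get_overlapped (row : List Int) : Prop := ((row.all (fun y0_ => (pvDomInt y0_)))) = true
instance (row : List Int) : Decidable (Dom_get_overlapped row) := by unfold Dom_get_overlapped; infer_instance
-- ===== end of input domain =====

-- B replaces A's run-length counter and zero-padding by counting adjacent (1,1) pairs and doubling (simpler decomposition, same O(n)).


-- ===== PORT A =====
-- literal transliteration: pad with zeros, fold the run-length counter
def get_overlapped (row : List Int) : Int :=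
  let row2 : List Int := [0] ++ row ++ [0]
  let s : Int × Int := row2.foldl
    (fun (st : Int × Int) (n : Int) =>
      if (1 : Int) = n then (st.1, st.2 + 1)
      else (st.1 + max 0 ((st.2 - 1) * 2), 0)) (0, 0)
  s.1

-- ===== PORT B =====
-- literal transliteration of Source B: 2 * count of adjacent (1,1) pairs via zip(r, r[1:])
def get_overlapped_alt (row : List Int) : Int :=
  2 * ((row.zip row.tail).foldl
    (fun (acc : Int) (p : Int × Int) => if p.1 = 1 ∧ p.2 = 1 then acc + 1 else acc) 0)

-- ===== PRECONDITION & SPEC =====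
def Spec_get_overlapped (row : List Int) (out : Int) : Prop := out = get_overlapped_alt row
instance (row : List Int) (out : Int) : Decidable (Spec_get_overlapped row out) := by unfold Spec_get_overlapped; infer_instance

-- ===== CLAIM (what is proved, stated in full; the proofs are below) =====
def Claim_equal_get_overlapped : Prop := ∀ (row : List Int), Dom_get_overlapped row → Spec_get_overlapped row (get_overlapped row)

-- ===== LEMMAS AND PROOFS =====

-- number of adjacent (1,1) pairs, structurally
def pvPairs : List Int → Int
  | a :: b :: t => (if a = 1 ∧ b = 1 then 1 else 0) + pvPairs (b :: t)
  | _ => 0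

def pvStepA (st : Int × Int) (n : Int) : Int × Int :=
  if (1 : Int) = n then (st.1, st.2 + 1)
  else (st.1 + max 0 ((st.2 - 1) * 2), 0)

theorem pvPairs_zip_fold (row : List Int) (acc : Int) :
    (row.zip row.tail).foldl
      (fun (a : Int) (p : Int × Int) => if p.1 = 1 ∧ p.2 = 1 then a + 1 else a) acc
    = acc + pvPairs row := by
  induction row generalizing acc with
  | nil => simp [pvPairs]
  | cons x t ih =>
    cases t with
    | nil => simp [pvPairs]
    | cons y s =>
      simp only [List.tail_cons, List.zip_cons_cons, List.foldl_cons]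
      rw [show ((y :: s).zip (y :: s).tail) = ((y :: s).zip (s)) by simp] at *
      rw [ih]
      by_cases h : x = 1 ∧ y = 1
      · simp only [pvPairs, h, if_true, and_self, if_pos h]
        ring
      · simp only [pvPairs, h, if_false, if_neg h]
        ring

theorem pvPairs_replicate_cons (k : ℕ) (xs : List Int) :
    pvPairs (List.replicate (k + 1) 1 ++ xs) = (k : Int) + pvPairs (1 :: xs) := by
  induction k with
  | zero => simp
  | succ k ih =>
    rw [List.replicate_succ, List.cons_append]
    rw [show List.replicate (k+1) (1:Int) ++ xs = 1 :: (List.replicate k 1 ++ xs) by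
      simp [List.replicate_succ]]
    simp only [pvPairs]
    rw [show (1:Int) :: (List.replicate k 1 ++ xs) = List.replicate (k+1) 1 ++ xs by
      simp [List.replicate_succ]]
    rw [ih]
    push_cast
    ring_nf
    simp

theorem pvMain (row : List Int) (k : ℕ) (o : Int) :
    ((row ++ [0]).foldl pvStepA (o, (k : Int))).1
      = o + 2 * pvPairs (List.replicate k 1 ++ row) := by
  induction row generalizing k o with
  | nil =>
    simp only [List.nil_append, List.foldl_cons, List.foldl_nil, pvStepA]
    have h1 : ¬ ((1 : Int) = 0) := by decide
    simp only [h1, if_false]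
    cases k with
    | zero => simp [pvPairs]
    | succ m =>
      rw [pvPairs_replicate_cons m [], show pvPairs [(1:Int)] = 0 from rfl]
      push_cast
      omega
  | cons n t ih =>
    simp only [List.cons_append, List.foldl_cons, pvStepA]
    by_cases h : (1 : Int) = n
    · subst h
      rw [if_pos rfl]
      have hih := ih (k + 1) o
      push_cast at hih ⊢
      rw [hih]
      congr 2
      simp [List.replicate_succ']
    · simp only [if_neg h]
      have hih := ih 0 (o + max 0 (((k : Int) - 1) * 2))
      push_cast at hih
      rw [hih]
      simp only [List.nil_append]
      have hp : pvPairs (n :: t) = pvPairs t := by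
        cases t with
        | nil => rfl
        | cons y s =>
          simp only [pvPairs]
          have : ¬ (n = 1 ∧ y = 1) := by rintro ⟨h1, _⟩; exact h h1.symm
          simp [this]
      cases k with
      | zero => simp [hp]
      | succ m =>
        rw [show List.replicate (m+1) (1:Int) ++ n :: t = List.replicate (m+1) 1 ++ (n :: t) from rfl,
            pvPairs_replicate_cons m (n :: t)]
        have hq : pvPairs (1 :: n :: t) = pvPairs (n :: t) := by
          have hn : ¬ n = 1 := fun h1 => h h1.symm
          simp [pvPairs, hn]
        rw [hq, hp]
        push_cast
        omega

theorem get_overlapped_spec : Claim_equal_get_overlapped := by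
  intro row _
  unfold Spec_get_overlapped get_overlapped get_overlapped_alt
  have h0 : ([0] ++ row ++ [0]) = (0 : Int) :: (row ++ [0]) := by simp
  rw [h0]
  simp only [List.foldl_cons]
  have hstep : (fun (st : Int × Int) (n : Int) =>
      if (1 : Int) = n then (st.1, st.2 + 1)
      else (st.1 + max 0 ((st.2 - 1) * 2), 0)) = pvStepA := rfl
  rw [hstep]
  norm_num
  rw [show (pvStepA (List.foldl pvStepA ((0:Int),(0:Int)) row) 0)
      = List.foldl pvStepA ((0:Int),(0:Int)) (row ++ [0]) by rw [List.foldl_append]; rfl]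
  have hm := pvMain row 0 0
  push_cast at hm
  rw [hm, pvPairs_zip_fold row 0]
  simp
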